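-- pv_equiv track=rewrite | github.com/nextfuturegenz/FutureexAI | src/pipeline/metadata_tagger.py | _detect_india_context
-- ===== SOURCE A (Python) =====
-- def _detect_india_context(
--
--     output: str,
--     instruction: str
-- ) -> bool:
--     """Detect if sample has India-specific content."""
--     india_signals = [
--         "₹", "inr", "rupee", "lakh", "crore",
--         "india", "indian", "tier 2", "tier 3",
--         "whatsapp", "upi", "mumbai", "delhi",
--         "bangalore", "jaipur", "surat", "nagpur",
--     ]
--     combined = (output + " " + instruction).lower()
--     return any(s in combined for s in india_signals)
-- ===== SOURCE B (Python) =====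
-- def _detect_india_context(
--     output: str,
--     instruction: str
-- ) -> bool:
--     """Detect if sample has India-specific content."""
--     india_signals = (
--         "₹", "inr", "rupee", "lakh", "crore",
--         "india", "indian", "tier 2", "tier 3",
--         "whatsapp", "upi", "mumbai", "delhi",
--         "bangalore", "jaipur", "surat", "nagpur",
--     )
--     combined = (output + " " + instruction).lower()
--     # single left-to-right pass: at each position test whether any signal starts there
--     for i in range(len(combined) + 1):
--         if combined.startswith(india_signals, i):
--             return True
--     return False
-- ===== Notes on version B (the rewrite author's own statement) =====
-- stated objective: alternative
-- what changed: Replaces the signal-major any('s in combined') loop (one substring scan per signal) by a single position-major left-to-right pass over the combined text that tests at each position whether any signal starts there (str.startswith with a tuple).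
import Mathlib
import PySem

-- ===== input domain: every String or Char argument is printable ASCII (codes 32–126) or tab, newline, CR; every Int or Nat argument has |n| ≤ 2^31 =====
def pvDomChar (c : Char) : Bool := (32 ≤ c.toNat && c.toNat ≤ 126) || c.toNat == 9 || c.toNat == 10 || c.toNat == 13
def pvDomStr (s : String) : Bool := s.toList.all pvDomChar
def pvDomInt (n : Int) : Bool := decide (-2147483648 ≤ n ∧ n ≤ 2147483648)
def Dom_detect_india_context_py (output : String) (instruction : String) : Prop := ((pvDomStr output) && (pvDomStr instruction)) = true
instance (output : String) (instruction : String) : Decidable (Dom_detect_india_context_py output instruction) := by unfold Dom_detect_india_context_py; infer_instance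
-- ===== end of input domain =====

-- B replaces A's signal-major any(s in combined) test by a single position-major scan
-- of the combined text that checks at each position whether any signal starts there (alternative, same cost).


-- ===== PORT A =====
-- A's list of India signal strings, verbatim
def indiaSignalsA : List String :=
  ["₹", "inr", "rupee", "lakh", "crore",
   "india", "indian", "tier 2", "tier 3",
   "whatsapp", "upi", "mumbai", "delhi",
   "bangalore", "jaipur", "surat", "nagpur"]

def detect_india_context_py (output : String) (instruction : String) : Bool :=
  let combined : List Char :=
    PySem.Chars.lower (output.toList ++ " ".toList ++ instruction.toList)
  indiaSignalsA.any (fun s => PySem.Chars.isIn s.toList combined)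

-- ===== PORT B =====
-- B's tuple of signals, as character lists
def indiaSignalsB : List (List Char) :=
  ["₹".toList, "inr".toList, "rupee".toList, "lakh".toList, "crore".toList,
   "india".toList, "indian".toList, "tier 2".toList, "tier 3".toList,
   "whatsapp".toList, "upi".toList, "mumbai".toList, "delhi".toList,
   "bangalore".toList, "jaipur".toList, "surat".toList, "nagpur".toList]

-- B's position loop: the suffix starting at position i plays the role of combined[i:];
-- 'combined.startswith(signals, i)' is 'some signal is a prefix of that suffix'
def pvScanB (sigs : List (List Char)) : List Char → Bool
  | [] => sigs.any (fun s => s.isPrefixOf ([] : List Char))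
  | c :: cs => sigs.any (fun s => s.isPrefixOf (c :: cs)) || pvScanB sigs cs

def detect_india_context_py_alt (output : String) (instruction : String) : Bool :=
  let combined : List Char :=
    PySem.Chars.lower (output.toList ++ " ".toList ++ instruction.toList)
  pvScanB indiaSignalsB combined

-- ===== PRECONDITION & SPEC =====
def Spec_detect_india_context_py (output : String) (instruction : String) (out : Bool) : Prop := out = detect_india_context_py_alt output instruction
instance (output : String) (instruction : String) (out : Bool) : Decidable (Spec_detect_india_context_py output instruction out) := by unfold Spec_detect_india_context_py; infer_instance

-- ===== CLAIM (what is proved, stated in full; the proofs are below) =====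
def Claim_equal_detect_india_context_py : Prop := ∀ (output : String) (instruction : String), Dom_detect_india_context_py output instruction → Spec_detect_india_context_py output instruction (detect_india_context_py output instruction)

-- ===== LEMMAS AND PROOFS =====

-- B's scan finds a signal iff some signal is an infix of the text
theorem pvScanB_eq_true_iff (sigs : List (List Char)) (cs : List Char) :
    pvScanB sigs cs = true ↔ ∃ s ∈ sigs, s <:+: cs := by
  induction cs with
  | nil =>
    simp [pvScanB, List.any_eq_true, List.isPrefixOf_iff_prefix, List.prefix_nil,
      List.infix_nil]
  | cons c cs ih =>
    simp only [pvScanB, Bool.or_eq_true, List.any_eq_true,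
      List.isPrefixOf_iff_prefix, ih]
    constructor
    · rintro (⟨s, hs, hp⟩ | ⟨s, hs, hi⟩)
      · exact ⟨s, hs, hp.isInfix⟩
      · exact ⟨s, hs, hi.trans (List.infix_cons_iff.mpr (Or.inr List.infix_rfl))⟩
    · rintro ⟨s, hs, hi⟩
      rcases List.infix_cons_iff.mp hi with hp | hi'
      · exact Or.inl ⟨s, hs, hp⟩
      · exact Or.inr ⟨s, hs, hi'⟩

theorem signals_map : indiaSignalsA.map String.toList = indiaSignalsB := by decide

-- ===== VERDICT (by name: the statement is the Claim_ definition above) =====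
theorem detect_india_context_py_spec : Claim_equal_detect_india_context_py := by
  intro output instruction _
  unfold Spec_detect_india_context_py detect_india_context_py detect_india_context_py_alt
  set combined := PySem.Chars.lower (output.toList ++ " ".toList ++ instruction.toList)
  rw [Bool.eq_iff_iff, List.any_eq_true, pvScanB_eq_true_iff]
  constructor
  · rintro ⟨s, hs, h⟩
    exact ⟨s.toList, signals_map ▸ List.mem_map_of_mem hs,
      (PySem.Chars.isIn_iff_infix _ _).mp h⟩
  · rintro ⟨s, hs, h⟩
    rw [← signals_map] at hs
    rcases List.mem_map.mp hs with ⟨t, ht, rfl⟩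
    exact ⟨t, ht, (PySem.Chars.isIn_iff_infix _ _).mpr h⟩
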